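-- pv_equiv track=rewrite | github.com/sourya/compas_rcf | rcf/ur/comm.py | concatenate_script
-- ===== SOURCE A (Python) =====
-- def concatenate_script(list_ur_commands):
--     """
--     Internal function that concatenates generated UR script into one large script file. Usually used to combine
--     scripts generated by the GrasshopperPython components
--
--     Args:
--         list_ur_commands: A list of formatted UR Script strings
--
--     Returns:
--         ur_script: The concatenated script
--     """
--
--     ur_script = "\ndef clay_script():\n"
--     # ur_script += '\tpopup("running MAS_clay_shooting_script")\n'
--
--     combined_script = ""
--     for ur_cmd in list_ur_commands:
--         combined_script += ur_cmd
--
--     # format combined script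
--     lines = combined_script.split("\n")
--     for l in lines:
--         ur_script += "\t" + l + "\n"
--
--     ur_script += 'end\n'
--     ur_script += '\nclay_script()\n'
--     return ur_script
-- ===== SOURCE B (Python) =====
-- def concatenate_script(list_ur_commands):
--     combined = "".join(list_ur_commands)
--     return ("\ndef clay_script():\n\t"
--             + combined.replace("\n", "\n\t")
--             + "\nend\n\nclay_script()\n")
-- ===== Notes on version B (the rewrite author's own statement) =====
-- stated objective: idiomatic
-- what changed: B joins the commands once and produces the indented body in closed form via a single combined.replace('\n', '\n\t') instead of splitting into a line list and looping to prepend a tab to each line.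
import Mathlib
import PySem

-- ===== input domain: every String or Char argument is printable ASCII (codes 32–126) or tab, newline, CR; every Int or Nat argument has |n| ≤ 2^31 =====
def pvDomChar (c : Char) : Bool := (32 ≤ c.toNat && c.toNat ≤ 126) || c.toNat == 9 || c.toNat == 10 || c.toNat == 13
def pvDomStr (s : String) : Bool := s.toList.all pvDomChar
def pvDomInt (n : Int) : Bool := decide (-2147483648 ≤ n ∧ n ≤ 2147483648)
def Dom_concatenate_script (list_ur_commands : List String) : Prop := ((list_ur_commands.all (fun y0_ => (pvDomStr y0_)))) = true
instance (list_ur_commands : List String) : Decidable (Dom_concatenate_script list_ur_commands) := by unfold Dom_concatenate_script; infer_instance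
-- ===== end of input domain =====

-- B builds the indented body in closed form via one replace("\n", "\n\t") instead of
-- splitting into a line list and looping to prepend a tab to each line (idiomatic).

-- ===== PORT A =====
def concatenate_script (list_ur_commands : List String) : String :=
  let ur_script := "\ndef clay_script():\n"
  let combined_script := list_ur_commands.foldl (fun acc ur_cmd => acc ++ ur_cmd) ""
  -- combined_script.split("\n"): separator is non-empty, so split? is always `some`
  let lines := (PySem.Str.split? combined_script "\n").getD []
  let ur_script := lines.foldl (fun acc l => acc ++ "\t" ++ l ++ "\n") ur_script
  let ur_script := ur_script ++ "end\n"
  let ur_script := ur_script ++ "\nclay_script()\n"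
  ur_script

-- ===== PORT B =====
def concatenate_script_alt (list_ur_commands : List String) : String :=
  let combined := PySem.Str.join "" list_ur_commands
  "\ndef clay_script():\n\t" ++ PySem.Str.replace combined "\n" "\n\t" ++ "\nend\n\nclay_script()\n"

-- ===== PRECONDITION & SPEC =====
def Spec_concatenate_script (list_ur_commands : List String) (out : String) : Prop := out = concatenate_script_alt list_ur_commands
instance (list_ur_commands : List String) (out : String) : Decidable (Spec_concatenate_script list_ur_commands out) := by unfold Spec_concatenate_script; infer_instance

-- ===== CLAIM (what is proved, stated in full; the proofs are below) =====
def Claim_equal_concatenate_script : Prop := ∀ (list_ur_commands : List String), Dom_concatenate_script list_ur_commands → Spec_concatenate_script list_ur_commands (concatenate_script list_ur_commands)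

-- ===== LEMMAS AND PROOFS =====

-- canonical "insert a tab after every newline" function
def pvTabAfterNl : List Char → List Char
  | [] => []
  | c :: t => if c = '\n' then '\n' :: '\t' :: pvTabAfterNl t else c :: pvTabAfterNl t

-- canonical split-on-newline with a reversed current-piece accumulator (mirrors splitOn.go's state)
def pvSplitNl : List Char → List Char → List (List Char)
  | cur, [] => [cur.reverse]
  | cur, c :: t => if c = '\n' then cur.reverse :: pvSplitNl [] t else pvSplitNl (c :: cur) t

theorem pv_intercalate_nil {α : Type} (xs : List (List α)) : List.intercalate ([] : List α) xs = xs.flatten := by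
  induction xs with
  | nil => rfl
  | cons x t ih =>
    cases t with
    | nil => simp [List.intercalate]
    | cons y u =>
      simp only [List.intercalate, List.intersperse] at ih ⊢
      simp_all

theorem pv_replace_go (fuel : Nat) : ∀ (l acc : List Char), l.length ≤ fuel →
    PySem.Chars.replace.go ['\n'] ['\n', '\t'] fuel l acc = acc.reverse ++ pvTabAfterNl l := by
  induction fuel with
  | zero =>
    intro l acc h
    have : l = [] := List.eq_nil_of_length_eq_zero (Nat.le_zero.mp h)
    subst this
    simp [PySem.Chars.replace.go, pvTabAfterNl]
  | succ n ih =>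
    intro l acc h
    cases l with
    | nil => simp [PySem.Chars.replace.go, pvTabAfterNl]
    | cons c t =>
      simp only [PySem.Chars.replace.go, List.isPrefixOf, Bool.and_true]
      by_cases hc : c = '\n'
      · subst hc
        simp only [beq_self_eq_true, if_pos]
        rw [show (List.drop ['\n'].length ('\n' :: t)) = t by simp]
        rw [ih t _ (by simpa using Nat.le_of_succ_le_succ h)]
        simp [pvTabAfterNl]
      · rw [if_neg (by simp; exact fun h => hc h.symm)]
        rw [ih t _ (by simpa using Nat.le_of_succ_le_succ h)]
        simp [pvTabAfterNl, hc]

theorem pv_splitOn_go (fuel : Nat) : ∀ (l cur : List Char) (accs : List (List Char)), l.length ≤ fuel →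
    PySem.Chars.splitOn.go ['\n'] fuel l cur accs = accs.reverse ++ pvSplitNl cur l := by
  induction fuel with
  | zero =>
    intro l cur accs h
    have : l = [] := List.eq_nil_of_length_eq_zero (Nat.le_zero.mp h)
    subst this
    simp [PySem.Chars.splitOn.go, pvSplitNl]
  | succ n ih =>
    intro l cur accs h
    cases l with
    | nil => simp [PySem.Chars.splitOn.go, pvSplitNl]
    | cons c t =>
      simp only [PySem.Chars.splitOn.go, List.isPrefixOf, Bool.and_true]
      by_cases hc : c = '\n'
      · subst hc
        simp only [beq_self_eq_true, if_pos]
        rw [show (List.drop ['\n'].length ('\n' :: t)) = t by simp]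
        rw [ih t [] (cur.reverse :: _) (by simpa using Nat.le_of_succ_le_succ h)]
        simp [pvSplitNl]
      · rw [if_neg (by simp; exact fun h => hc h.symm)]
        rw [ih t (c :: cur) _ (by simpa using Nat.le_of_succ_le_succ h)]
        simp [pvSplitNl, hc]

theorem pv_flatMap_splitNl (l : List Char) : ∀ cur : List Char,
    (pvSplitNl cur l).flatMap (fun p => '\t' :: (p ++ ['\n'])) =
      '\t' :: (cur.reverse ++ pvTabAfterNl l ++ ['\n']) := by
  induction l with
  | nil => intro cur; simp [pvSplitNl, pvTabAfterNl]
  | cons c t ih =>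
    intro cur
    by_cases hc : c = '\n'
    · subst hc
      rw [show pvSplitNl cur ('\n' :: t) = cur.reverse :: pvSplitNl [] t from by simp [pvSplitNl]]
      rw [List.flatMap_cons, ih []]
      simp [pvTabAfterNl]
    · simp only [pvSplitNl, pvTabAfterNl, if_neg hc, ih (c :: cur)]
      simp

theorem pv_foldl_append_toList (l : List String) : ∀ acc : String,
    (l.foldl (fun acc ur_cmd => acc ++ ur_cmd) acc).toList =
      acc.toList ++ (l.map String.toList).flatten := by
  induction l with
  | nil => intro acc; simp
  | cons x xs ih => intro acc; simp [List.foldl_cons, ih, String.toList_append]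

theorem pv_foldl_lines_toList (lines : List String) : ∀ acc : String,
    (lines.foldl (fun acc l => acc ++ "\t" ++ l ++ "\n") acc).toList =
      acc.toList ++ (lines.map String.toList).flatMap (fun p => '\t' :: (p ++ ['\n'])) := by
  induction lines with
  | nil => intro acc; simp
  | cons x xs ih =>
    intro acc
    simp [List.foldl_cons, ih, String.toList_append]

-- ===== VERDICT (by name: the statement is the Claim_ definition above) =====
theorem concatenate_script_spec : Claim_equal_concatenate_script := by
  intro l _
  unfold Spec_concatenate_script concatenate_script concatenate_script_alt
  apply String.toList_inj.mp
  simp only [String.toList_append, PySem.Str.toList_replace, PySem.Str.toList_join]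
  -- the joined / folded combined script, as a character list
  have hjoin : PySem.Chars.join "".toList (l.map String.toList) = (l.map String.toList).flatten := by
    simp only [PySem.Chars.join]
    exact pv_intercalate_nil _
  have hcomb := pv_foldl_append_toList l ""
  set cs : List Char := (l.map String.toList).flatten with hcs
  -- A's split: split? with non-empty separator is `some` of the splitOn pieces
  have hsplit : PySem.Str.split? (l.foldl (fun acc ur_cmd => acc ++ ur_cmd) "") "\n" =
      some ((PySem.Chars.splitOn cs ['\n']).map String.ofList) := by
    simp only [PySem.Str.split?, PySem.Chars.split?]
    rw [hcomb]
    simp [hcs]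
  rw [hsplit]
  simp only [Option.getD_some]
  rw [pv_foldl_lines_toList]
  have hmap : ((PySem.Chars.splitOn cs ['\n']).map String.ofList).map String.toList =
      PySem.Chars.splitOn cs ['\n'] := by
    simp [List.map_map, Function.comp_def]
  rw [hmap]
  have hS : PySem.Chars.splitOn cs ['\n'] = pvSplitNl [] cs := by
    simpa using pv_splitOn_go (cs.length + 1) cs [] [] (Nat.le_succ _)
  have hR : PySem.Chars.replace cs ['\n'] ['\n', '\t'] = pvTabAfterNl cs := by
    simp only [PySem.Chars.replace]
    rw [if_neg (by simp)]
    simpa using pv_replace_go cs.length cs [] (Nat.le_refl _)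
  rw [show ("\n" : String).toList = ['\n'] from rfl, show ("\n\t" : String).toList = ['\n', '\t'] from rfl]
  rw [hS, hjoin, hR, pv_flatMap_splitNl cs []]
  simp
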